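-- pv_equiv track=rewrite | github.com/FahimShihab/CSE221-Assignments | 221 Assignments/Week 2/Problem 4.py | find_first_one
-- ===== SOURCE A (Python) =====
-- def find_first_one(S):
--     left, right = 0, len(S) - 1
--     first_one = -1
--     while left <= right:
--         mid = (left + right) // 2
--         if S[mid] == '1':
--             first_one = mid + 1
--             right = mid - 1
--         else:
--             left = mid + 1
--     return first_one
-- ===== SOURCE B (Python) =====
-- def find_first_one(S):
--     def search(lo, hi):
--         if lo > hi:
--             return -1
--         mid = (lo + hi) // 2
--         if S[mid] == '1':
--             res = search(lo, mid - 1)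
--             return res if res != -1 else mid + 1
--         return search(mid + 1, hi)
--     return search(0, len(S) - 1)
-- ===== Notes on version B (the rewrite author's own statement) =====
-- stated objective: alternative
-- what changed: A's iterative while-loop with mutable left/right/first_one state is replaced by a recursive divide-and-conquer helper search(lo, hi) over the index interval (prefer the left recursion's result, fall back to mid+1).
import Mathlib
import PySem

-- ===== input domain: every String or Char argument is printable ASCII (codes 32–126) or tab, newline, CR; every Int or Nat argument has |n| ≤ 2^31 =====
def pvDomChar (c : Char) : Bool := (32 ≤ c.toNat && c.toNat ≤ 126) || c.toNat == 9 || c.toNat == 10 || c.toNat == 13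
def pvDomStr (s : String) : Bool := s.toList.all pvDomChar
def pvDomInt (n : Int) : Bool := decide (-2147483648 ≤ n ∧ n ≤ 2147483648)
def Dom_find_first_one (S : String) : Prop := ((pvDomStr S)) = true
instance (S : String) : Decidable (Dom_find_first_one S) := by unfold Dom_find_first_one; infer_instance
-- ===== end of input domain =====

-- B replaces A's iterative while-loop (mutable left/right/first_one) by a recursive
-- divide-and-conquer helper over the index interval; same return value everywhere.

-- ===== PORT A =====
-- A's while-loop, state (left, right, first_one); mid = (left+right)//2 written inline.
def pyA_loop (cs : List Char) (left right first_one : Int) : Int :=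
  if _h : left ≤ right then
    match PySem.List.pyGet? cs (PySem.Int.floordiv (left + right) 2) with
    | some c =>
      if c = '1' then
        pyA_loop cs left (PySem.Int.floordiv (left + right) 2 - 1)
          (PySem.Int.floordiv (left + right) 2 + 1)
      else pyA_loop cs (PySem.Int.floordiv (left + right) 2 + 1) right first_one
    | none => -1   -- IndexError in Python; unreachable from the initial call (0 ≤ mid ≤ len-1)
  else first_one
termination_by (right - left + 1).toNat
decreasing_by
  all_goals
    have hb := PySem.Int.floordiv_two_mid_bounds (lo := left) (hi := right) _h
    omega

def find_first_one (S : String) : Int :=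
  pyA_loop S.toList 0 (PySem.List.len S.toList - 1) (-1)

-- ===== PORT B =====
-- B's recursive search over the interval [lo, hi]; mid = (lo+hi)//2 written inline.
def pyB_search (cs : List Char) (lo hi : Int) : Int :=
  if _h : lo > hi then -1
  else
    match PySem.List.pyGet? cs (PySem.Int.floordiv (lo + hi) 2) with
    | some c =>
      if c = '1' then
        if pyB_search cs lo (PySem.Int.floordiv (lo + hi) 2 - 1) ≠ -1 then
          pyB_search cs lo (PySem.Int.floordiv (lo + hi) 2 - 1)
        else PySem.Int.floordiv (lo + hi) 2 + 1
      else pyB_search cs (PySem.Int.floordiv (lo + hi) 2 + 1) hi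
    | none => -1   -- IndexError in Python; unreachable from the initial call
termination_by (hi - lo + 1).toNat
decreasing_by
  all_goals
    have hb := PySem.Int.floordiv_two_mid_bounds (lo := lo) (hi := hi) (by omega)
    omega

def find_first_one_alt (S : String) : Int :=
  pyB_search S.toList 0 (PySem.List.len S.toList - 1)

-- ===== PRECONDITION & SPEC =====
def Spec_find_first_one (S : String) (out : Int) : Prop := out = find_first_one_alt S
instance (S : String) (out : Int) : Decidable (Spec_find_first_one S out) := by unfold Spec_find_first_one; infer_instance

-- ===== CLAIM (what is proved, stated in full; the proofs are below) =====
def Claim_equal_find_first_one : Prop := ∀ (S : String), Dom_find_first_one S → Spec_find_first_one S (find_first_one S)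

-- ===== LEMMAS AND PROOFS =====

-- B's search never returns below -1 when the interval starts at a nonnegative index
-- (a '1' branch returns mid+1 ≥ 1, all other exits are ≥ -1).
lemma pyB_search_ge (n : Nat) (cs : List Char) (lo hi : Int)
    (hn : (hi - lo + 1).toNat ≤ n) (hlo : 0 ≤ lo) :
    -1 ≤ pyB_search cs lo hi := by
  induction n generalizing lo hi with
  | zero =>
    rw [pyB_search]
    simp [show lo > hi by omega]
  | succ n ih =>
    rw [pyB_search]
    split
    · omega
    · rename_i h
      have hb := PySem.Int.floordiv_two_mid_bounds (lo := lo) (hi := hi) (by omega)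
      cases hg : PySem.List.pyGet? cs (PySem.Int.floordiv (lo + hi) 2) with
      | none => simp
      | some c =>
        dsimp only
        split_ifs with hc _hr
        · exact ih lo (PySem.Int.floordiv (lo + hi) 2 - 1) (by omega) hlo
        · omega
        · exact ih (PySem.Int.floordiv (lo + hi) 2 + 1) hi (by omega) (by omega)

-- Loop invariant: A's loop with accumulator acc equals B's search, falling back to
-- acc when the search finds no '1'. Hypotheses (true initially and preserved):
-- lo nonnegative, hi within the list.
lemma loop_eq_search (n : Nat) (cs : List Char) (lo hi acc : Int)
    (hn : (hi - lo + 1).toNat ≤ n) (hlo : 0 ≤ lo) (hhi : hi < (cs.length : Int)) :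
    pyA_loop cs lo hi acc = if pyB_search cs lo hi = -1 then acc else pyB_search cs lo hi := by
  induction n generalizing lo hi acc with
  | zero =>
    rw [pyA_loop, pyB_search]
    simp [show ¬ lo ≤ hi by omega, show lo > hi by omega]
  | succ n ih =>
    rw [pyA_loop, pyB_search]
    simp only [PySem.Int.floordiv_eq_ediv_of_pos (show (0:Int) < 2 by norm_num)]
    by_cases h : lo ≤ hi
    · rw [dif_pos h, dif_neg (show ¬ lo > hi by omega)]
      have hg := PySem.List.pyGet?_eq_some_getElem (xs := cs)
        (i := (lo + hi) / 2) (by omega) (by omega)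
      rw [hg]
      by_cases hc : cs[((lo + hi) / 2).toNat] = '1'
      · simp only [if_pos hc]
        rw [ih lo ((lo + hi) / 2 - 1) _ (by omega) hlo (by omega)]
        have hge := pyB_search_ge n cs lo ((lo + hi) / 2 - 1) (by omega) hlo
        split_ifs <;> omega
      · simp only [if_neg hc]
        exact ih ((lo + hi) / 2 + 1) hi acc (by omega) (by omega) hhi
    · rw [dif_neg h, dif_pos (show lo > hi by omega), if_pos rfl]

-- ===== VERDICT (by name: the statement is the Claim_ definition above) =====
theorem find_first_one_spec : Claim_equal_find_first_one := by
  intro S _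
  unfold Spec_find_first_one find_first_one find_first_one_alt
  rw [loop_eq_search (S.toList.length) S.toList 0 (PySem.List.len S.toList - 1) (-1)
      (by simp [PySem.List.len_eq]) (by omega) (by simp [PySem.List.len_eq])]
  split <;> omega
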